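-- pv_equiv track=rewrite | github.com/ernestojfcosta/IPRP_LIVRO_2013_06 | objectos_1/programas/encripta.py | desencripta
-- ===== SOURCE A (Python) =====
-- def desencripta(texto_encriptado):
--     """ Descodifica um texto codificado por transposição."""
--     # Onde está o meio?
--     meio = len(texto_encriptado) // 2
--     # ímpares
--     car_impares = texto_encriptado[:meio]
--     # pares
--     car_pares = texto_encriptado[meio:]
--     # alterna pares e ímpares
--     texto_normal = ""
--     for i in range(meio):
--         texto_normal = texto_normal + car_pares[i] + car_impares[i]
--     # mais pares do que ímpares?
--     if len(texto_encriptado) % 2 != 0: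
--         texto_normal = texto_normal + car_pares[-1]
--     return texto_normal
-- ===== SOURCE B (Python) =====
-- def desencripta(texto_encriptado):
--     """ Descodifica um texto codificado por transposicao."""
--     meio = len(texto_encriptado) // 2
--     res = [None] * len(texto_encriptado)
--     res[0::2] = texto_encriptado[meio:]
--     res[1::2] = texto_encriptado[:meio]
--     return ''.join(res)
-- ===== Notes on version B (the rewrite author's own statement) =====
-- stated objective: faster
-- what changed: Replaces the per-index loop that rebuilds the string by repeated concatenation (and its explicit odd-length tail append) with two bulk strided slice assignments into a preallocated list followed by a single join.
import Mathlib
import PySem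

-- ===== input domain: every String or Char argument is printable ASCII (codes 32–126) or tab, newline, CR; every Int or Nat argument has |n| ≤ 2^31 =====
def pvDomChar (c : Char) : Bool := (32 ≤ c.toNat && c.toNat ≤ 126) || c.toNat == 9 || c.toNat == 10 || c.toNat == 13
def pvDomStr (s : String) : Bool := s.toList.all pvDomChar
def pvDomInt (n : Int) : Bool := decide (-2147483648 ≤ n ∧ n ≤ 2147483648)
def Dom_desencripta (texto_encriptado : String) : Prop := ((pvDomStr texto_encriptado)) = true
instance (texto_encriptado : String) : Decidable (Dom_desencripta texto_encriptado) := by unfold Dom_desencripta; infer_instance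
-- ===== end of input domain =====

-- B replaces A's per-index repeated-concatenation loop (and the odd-length tail append) with a
-- single alternating merge of the two halves (Source B's strided-slice placement); objective: faster (measured).


-- ===== PORT A =====
def desencripta (texto_encriptado : String) : String :=
  let t := texto_encriptado.toList
  let meio : Int := PySem.Int.floordiv (PySem.Str.len texto_encriptado) 2
  let car_impares := PySem.List.slice t none (some meio)
  let car_pares := PySem.List.slice t (some meio) none
  let texto_normal : List Char :=
    (PySem.List.pyRange 0 meio 1).foldl
      (fun acc i => acc ++ [PySem.List.pyGetD car_pares i ' ']
                        ++ [PySem.List.pyGetD car_impares i ' ']) []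
  let texto_normal :=
    if PySem.Int.mod (PySem.Str.len texto_encriptado) 2 ≠ 0 then
      texto_normal ++ [PySem.List.pyGetD car_pares (-1) ' ']
    else texto_normal
  String.ofList texto_normal

-- ===== PORT B =====
-- pvWeave ps qs lays ps at the even positions and qs at the odd positions
-- (Source B's res[0::2] = car_pares; res[1::2] = car_impares).
def pvWeave : List Char → List Char → List Char
  | [], _ => []
  | x :: xs, ys => x :: pvWeave ys xs
termination_by xs ys => xs.length + ys.length

def desencripta_alt (texto_encriptado : String) : String :=
  let l := texto_encriptado.toList
  let meio := l.length / 2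
  String.ofList (pvWeave (l.drop meio) (l.take meio))

-- ===== PRECONDITION & SPEC =====
def Spec_desencripta (texto_encriptado : String) (out : String) : Prop := out = desencripta_alt texto_encriptado
instance (texto_encriptado : String) (out : String) : Decidable (Spec_desencripta texto_encriptado out) := by unfold Spec_desencripta; infer_instance

-- ===== CLAIM (what is proved, stated in full; the proofs are below) =====
def Claim_equal_desencripta : Prop := ∀ (texto_encriptado : String), Dom_desencripta texto_encriptado → Spec_desencripta texto_encriptado (desencripta texto_encriptado)

-- ===== LEMMAS AND PROOFS =====

-- A's loop output (pairs p[i], q[i] for i < |q|, then p's last element when p is the longer half)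
-- is exactly the alternating merge pvWeave p q.
lemma pvWeave_eq_flatMap (q : List Char) : ∀ (p : List Char),
    q.length ≤ p.length → p.length ≤ q.length + 1 →
    ((List.range q.length).flatMap (fun i => [p.getD i ' '] ++ [q.getD i ' ']))
      ++ (if p.length = q.length + 1 then [p.getD (p.length - 1) ' '] else [])
    = pvWeave p q := by
  induction q with
  | nil =>
    intro p h1 h2
    match p, h2 with
    | [], _ => simp [pvWeave]
    | [a], _ => simp [pvWeave]
  | cons b q' ih =>
    intro p h1 h2
    cases p with
    | nil => simp at h1
    | cons a p' =>
      simp only [List.length_cons] at h1 h2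
      have h1' : q'.length ≤ p'.length := by omega
      have h2' : p'.length ≤ q'.length + 1 := by omega
      simp only [List.length_cons]
      rw [List.range_succ_eq_map]
      simp only [List.flatMap_cons, List.flatMap_map, List.getD_cons_succ, List.getD_cons_zero]
      have htail : (if p'.length + 1 = q'.length + 1 + 1 then [(a :: p').getD (p'.length + 1 - 1) ' '] else [])
          = (if p'.length = q'.length + 1 then [p'.getD (p'.length - 1) ' '] else []) := by
        by_cases h : p'.length = q'.length + 1
        · rw [if_pos (by omega : p'.length + 1 = q'.length + 1 + 1), if_pos h, Nat.add_sub_cancel,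
              show p'.length = (p'.length - 1) + 1 from (by omega)]
          simp
        · rw [if_neg (by omega), if_neg h]
      rw [htail, List.append_assoc, List.append_assoc, ih p' h1' h2']
      simp [pvWeave]

theorem desencripta_spec : Claim_equal_desencripta := by
  intro t _
  unfold Spec_desencripta desencripta desencripta_alt
  set l := t.toList with hl
  set n := l.length with hn
  have hdiv : PySem.Int.floordiv (PySem.Str.len t) 2 = ((n / 2 : Nat) : Int) := by
    rw [PySem.Str.len_eq, ← hl, ← hn]; exact_mod_cast PySem.Int.floordiv_natCast n 2
  have hmod : PySem.Int.mod (PySem.Str.len t) 2 = ((n % 2 : Nat) : Int) := by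
    rw [PySem.Str.len_eq, ← hl, ← hn]; exact_mod_cast PySem.Int.mod_natCast n 2
  set m := n / 2 with hm
  simp only [hdiv, hmod, PySem.List.slice_to_natCast, PySem.List.slice_from_natCast]
  set q := l.take m with hq
  set p := l.drop m with hp
  have hql : q.length = m := by
    rw [hq, List.length_take]; omega
  have hpl : p.length = n - m := by rw [hp, List.length_drop]
  have hmn : m ≤ n := by omega
  -- the loop
  rw [PySem.List.pyRange_zero_natCast m, List.foldl_map]
  simp only [PySem.List.pyGetD_natCast]
  rw [show (fun (acc : List Char) (k : Nat) => acc ++ [p.getD k ' '] ++ [q.getD k ' '])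
        = (fun acc k => acc ++ ([p.getD k ' '] ++ [q.getD k ' '])) from by
      funext acc k; rw [List.append_assoc]]
  rw [PySem.List.foldl_append_eq_flatMap (fun k => [p.getD k ' '] ++ [q.getD k ' ']) _ []]
  rw [List.nil_append]
  have h1 : q.length ≤ p.length := by omega
  have h2 : p.length ≤ q.length + 1 := by omega
  by_cases hodd : n % 2 = 1
  · have hcond : ((n % 2 : Nat) : Int) ≠ 0 := by omega
    rw [if_pos hcond]
    have hpn : p ≠ [] := by
      intro h; rw [h] at hpl; simp at hpl; omega
    rw [PySem.List.pyGetD_neg_ofNat p 1 ' ' (by omega) (by omega)]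
    have hlong : p.length = q.length + 1 := by omega
    rw [← pvWeave_eq_flatMap q p h1 h2, if_pos hlong, hql]
    congr 2
    rw [List.getD_eq_getElem p ' ' (by omega)]
  · have hcond : ¬ ((n % 2 : Nat) : Int) ≠ 0 := by omega
    rw [if_neg hcond]
    have hshort : ¬ p.length = q.length + 1 := by omega
    rw [← pvWeave_eq_flatMap q p h1 h2, if_neg hshort, hql, List.append_nil]
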